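-- pv_equiv track=rewrite | github.com/Zhiyu-Lei/2019-Credit-Suisse-Global-Coding-Challenge | Question2.py | question02
-- ===== SOURCE A (Python) =====
-- def question02(risk, bonus, trader):
--     """
--     Calculate the maximum profit for a team of traders with a series of trades
--     Only traders with skill levels at or above the difficulty of a trade can complete that trade
--     :param risk: a list of the difficulties of the trades
--     :param bonus: a list of the bonuses from completion of the trades
--     :param trader: a list of the skill levels of the traders
--     :return: the maximum profit that can be made from the trading strategy
--     """
--     max_profit = 0  # initialize the total maximum profit
--     for td in trader:
--         profit = 0  # initialize the potential profit a single trader can make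
--         for r, b in zip(risk, bonus):
--             if td >= r:  # the trader can complete the trade
--                 if b > profit:
--                     profit = b  # update the potential profit with a higher value
--         max_profit += profit  # update the total maximum profit
--     return max_profit
-- ===== SOURCE B (Python) =====
-- def question02(risk, bonus, trader):
--     # Sort trades by risk, precompute prefix maxima of the bonuses, then
--     # binary-search each trader's skill level: O((N+T) log N) instead of O(T*N).
--     pairs = sorted(zip(risk, bonus), key=lambda p: p[0])
--     risks = [p[0] for p in pairs]
--     pref = [0]
--     best = 0
--     for p in pairs:
--         if p[1] > best:
--             best = p[1]
--         pref.append(best)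
--     total = 0
--     for td in trader:
--         lo, hi = 0, len(risks)   # bisect_right(risks, td)
--         while lo < hi:
--             mid = (lo + hi) // 2
--             if td < risks[mid]:
--                 hi = mid
--             else:
--                 lo = mid + 1
--         total += pref[lo]
--     return total
-- ===== Notes on version B (the rewrite author's own statement) =====
-- stated objective: faster
-- what changed: Replaces the per-trader linear scan over all trades by sorting the trades by risk once, precomputing prefix maxima of the bonuses, and binary-searching each trader's skill level.
import Mathlib
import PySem

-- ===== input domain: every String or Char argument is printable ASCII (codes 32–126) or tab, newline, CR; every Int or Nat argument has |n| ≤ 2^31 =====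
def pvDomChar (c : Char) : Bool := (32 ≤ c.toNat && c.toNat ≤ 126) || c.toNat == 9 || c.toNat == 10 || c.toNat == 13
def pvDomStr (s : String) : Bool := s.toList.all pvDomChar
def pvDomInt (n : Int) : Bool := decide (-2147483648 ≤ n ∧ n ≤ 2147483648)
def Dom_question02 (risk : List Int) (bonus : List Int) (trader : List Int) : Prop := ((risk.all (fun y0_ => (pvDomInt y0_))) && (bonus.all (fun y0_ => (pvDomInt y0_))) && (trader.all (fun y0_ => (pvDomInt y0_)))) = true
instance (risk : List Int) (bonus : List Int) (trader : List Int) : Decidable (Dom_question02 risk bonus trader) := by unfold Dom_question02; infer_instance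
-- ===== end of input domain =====

-- B replaces A's per-trader linear scan over all trades by sorting the trades by risk,
-- prefix maxima of the bonuses, and a binary search per trader (asymptotically faster).


-- ===== PORT A =====
def question02 (risk : List Int) (bonus : List Int) (trader : List Int) : Int :=
  trader.foldl
    (fun max_profit td =>
      max_profit +
        (List.zip risk bonus).foldl
          (fun profit rb =>
            if td ≥ rb.1 then (if rb.2 > profit then rb.2 else profit) else profit)
          0)
    0

-- ===== PORT B =====
-- one step of Source B's prefix-maximum loop: state is (pref, best)
def q2Step (s : List Int × Int) (p : Int × Int) : List Int × Int :=
  (s.1 ++ [if p.2 > s.2 then p.2 else s.2], if p.2 > s.2 then p.2 else s.2)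

def question02_alt (risk : List Int) (bonus : List Int) (trader : List Int) : Int :=
  let pairs := PySem.List.sorted (List.zip risk bonus) (fun p => p.1)
  let risks := pairs.map (fun p => p.1)
  let pref := (pairs.foldl q2Step ([0], 0)).1
  -- Source B's hand-written while loop is exactly bisect_right; pref[lo] is always in
  -- range (lo ≤ len(risks) < len(pref)), so getD's default is never taken.
  trader.foldl
    (fun total td => total + pref.getD (PySem.List.bisectRight risks td) 0) 0

-- ===== PRECONDITION & SPEC =====
def Spec_question02 (risk : List Int) (bonus : List Int) (trader : List Int) (out : Int) : Prop := out = question02_alt risk bonus trader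
instance (risk : List Int) (bonus : List Int) (trader : List Int) (out : Int) : Decidable (Spec_question02 risk bonus trader out) := by unfold Spec_question02; infer_instance

-- ===== CLAIM (what is proved, stated in full; the proofs are below) =====
def Claim_equal_question02 : Prop := ∀ (risk : List Int) (bonus : List Int) (trader : List Int), Dom_question02 risk bonus trader → Spec_question02 risk bonus trader (question02 risk bonus trader)

-- ===== LEMMAS AND PROOFS =====

-- the common per-trader accumulator step: running max of the bonuses of affordable trades
def maxStep (td : Int) (a : Int) (p : Int × Int) : Int :=
  if p.1 ≤ td then max a p.2 else a

-- A's inner loop is the maxStep fold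
theorem innerA_eq (td : Int) (l : List (Int × Int)) :
    l.foldl (fun profit rb =>
      if td ≥ rb.1 then (if rb.2 > profit then rb.2 else profit) else profit) 0
    = l.foldl (maxStep td) 0 := by
  apply PySem.List.foldl_congr_mem
  intro acc x _
  unfold maxStep
  split_ifs <;> omega

-- the maxStep fold is invariant under permutation of the trade list
theorem maxStep_perm (td : Int) {l₁ l₂ : List (Int × Int)} (h : l₁.Perm l₂) :
    l₁.foldl (maxStep td) 0 = l₂.foldl (maxStep td) 0 := by
  haveI : RightCommutative (maxStep td) := ⟨by
    intro b a₁ a₂; unfold maxStep; split_ifs <;> omega⟩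
  exact h.foldl_eq 0

theorem maxStep_id (td : Int) (l : List (Int × Int)) (a : Int)
    (h : ∀ p ∈ l, td < p.1) : l.foldl (maxStep td) a = a := by
  induction l generalizing a with
  | nil => rfl
  | cons p ps ih =>
    have hp := h p (by simp)
    simp only [List.foldl_cons, maxStep, if_neg (by omega : ¬ p.1 ≤ td)]
    exact ih a (fun q hq => h q (by simp [hq]))

theorem maxStep_all (td : Int) (l : List (Int × Int)) (a : Int)
    (h : ∀ p ∈ l, p.1 ≤ td) :
    l.foldl (maxStep td) a = l.foldl (fun a p => max a p.2) a := by
  apply PySem.List.foldl_congr_mem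
  intro acc x hx
  simp [maxStep, h x hx]

-- the prefix-maximum loop only appends to its list
theorem q2Step_prefix (ps : List (Int × Int)) (st : List Int × Int) :
    st.1 <+: (ps.foldl q2Step st).1 := by
  induction ps generalizing st with
  | nil => exact List.prefix_refl _
  | cons p ps ih =>
    simp only [List.foldl_cons]
    exact List.IsPrefix.trans ⟨_, rfl⟩ (ih (q2Step st p))

-- the k-th entry of the prefix list is the running max of the first k bonuses
theorem pref_spec (ps : List (Int × Int)) :
    ∀ (acc : List Int) (best : Int) (k : Nat), k ≤ ps.length →
    (ps.foldl q2Step (acc ++ [best], best)).1.getD (acc.length + k) 0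
      = (ps.take k).foldl (fun a p => max a p.2) best := by
  induction ps with
  | nil =>
    intro acc best k hk
    have hk0 : k = 0 := Nat.le_zero.mp hk
    subst hk0
    simp [List.getD_eq_getElem?_getD]
  | cons p ps ih =>
    intro acc best k hk
    have hbest : (if p.2 > best then p.2 else best) = max best p.2 := by
      split_ifs <;> omega
    have hstep : q2Step (acc ++ [best], best) p
        = ((acc ++ [best]) ++ [max best p.2], max best p.2) := by
      simp only [q2Step]
      rw [hbest]
    cases k with
    | zero =>
      rw [List.foldl_cons, hstep, List.take_zero, List.foldl_nil]
      have hpre := q2Step_prefix ps ((acc ++ [best]) ++ [max best p.2], max best p.2)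
      have hlen : acc.length + 0 < ((acc ++ [best]) ++ [max best p.2]).length := by
        simp
      have hlenL : acc.length + 0
          < (ps.foldl q2Step ((acc ++ [best]) ++ [max best p.2], max best p.2)).1.length :=
        Nat.lt_of_lt_of_le hlen hpre.length_le
      obtain ⟨t, ht⟩ := hpre
      rw [List.getD_eq_getElem _ _ hlenL]
      simp only [← ht]
      simp
    | succ k' =>
      rw [List.foldl_cons, hstep, List.take_succ_cons, List.foldl_cons]
      have hidx : acc.length + (k' + 1) = (acc ++ [best]).length + k' := by
        simp
        omega
      rw [hidx, ih (acc ++ [best]) (max best p.2) k' (by simpa using hk)]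

-- per trader: B's table lookup equals the maxStep fold over the sorted pairs
theorem perTrader (pairs : List (Int × Int))
    (hs : pairs.Pairwise (fun a b => a.1 ≤ b.1)) (td : Int) :
    (pairs.foldl q2Step ([0], 0)).1.getD
        (PySem.List.bisectRight (pairs.map (fun p => p.1)) td) 0
      = pairs.foldl (maxStep td) 0 := by
  have hrs : (pairs.map (fun p => p.1)).Pairwise (· ≤ ·) :=
    List.Pairwise.map _ (fun _ _ h => h) hs
  obtain ⟨hk, hlt, hgt⟩ := PySem.List.bisectRight_spec (pairs.map (fun p => p.1)) td hrs
  set k := PySem.List.bisectRight (pairs.map (fun p => p.1)) td with hkdef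
  have hklen : k ≤ pairs.length := by simpa using hk
  -- left side via pref_spec
  have hL := pref_spec pairs [] 0 k hklen
  simp only [List.nil_append, List.length_nil, Nat.zero_add] at hL
  rw [hL]
  -- right side: split pairs at k
  conv_rhs => rw [← List.take_append_drop k pairs, List.foldl_append]
  rw [maxStep_id td (pairs.drop k) _ ?_, maxStep_all td (pairs.take k) 0 ?_]
  · intro p hp
    obtain ⟨i, hi, hpi⟩ := List.mem_iff_getElem.mp hp
    have hi' : i < k := (by simpa using hi : i < k ∧ i < pairs.length).1
    have hip : i < pairs.length := by omega
    have := hlt i (by simpa using hip) (by simpa using hi')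
    rw [List.getElem_map] at this
    rw [← hpi, List.getElem_take]
    exact this
  · intro p hp
    obtain ⟨i, hi, hpi⟩ := List.mem_iff_getElem.mp hp
    have hip : k + i < pairs.length := by simp at hi; omega
    have := hgt (k + i) (by simpa using hip) (by omega)
    rw [List.getElem_map] at this
    rw [← hpi, List.getElem_drop]
    exact this

-- ===== VERDICT (by name: the statement is the Claim_ definition above) =====
theorem question02_spec : Claim_equal_question02 := by
  intro risk bonus trader _
  unfold Spec_question02 question02 question02_alt
  apply PySem.List.foldl_congr_mem
  intro acc td _
  congr 1
  rw [innerA_eq td,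
    maxStep_perm td (PySem.List.sorted_perm (List.zip risk bonus) (fun p => p.1) false).symm]
  exact (perTrader _ (PySem.List.sorted_pairwise _ _) td).symm
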